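-- pv_equiv track=rewrite | github.com/manasij7479/souper | utils/souper-infer-openai.py | splitOpt
-- ===== SOURCE A (Python) =====
-- def splitOpt(opt):
--   lines = opt.split("\n")
--   lhs = ""
--   rhs = ""
--   appendingToLHS = True
--   for line in lines:
--     if appendingToLHS:
--       lhs += line + "\n"
--     else:
--       rhs += line + "\n"
--     if line.startswith("infer"):
--       appendingToLHS = False
--   return lhs.strip(), rhs.strip()
-- ===== SOURCE B (Python) =====
-- def splitOpt(opt):
--   lines = opt.split("\n")
--   i = next((k for k, line in enumerate(lines) if line.startswith("infer")), len(lines))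
--   return "\n".join(lines[:i + 1]).strip(), "\n".join(lines[i + 1:]).strip()
-- ===== Notes on version B (the rewrite author's own statement) =====
-- stated objective: simpler
-- what changed: Replaces the flag-driven accumulation loop (appending line+"\n" to one of two growing strings) by locate-then-partition: find the index of the first 'infer' line, then join the two list slices.
import Mathlib
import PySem

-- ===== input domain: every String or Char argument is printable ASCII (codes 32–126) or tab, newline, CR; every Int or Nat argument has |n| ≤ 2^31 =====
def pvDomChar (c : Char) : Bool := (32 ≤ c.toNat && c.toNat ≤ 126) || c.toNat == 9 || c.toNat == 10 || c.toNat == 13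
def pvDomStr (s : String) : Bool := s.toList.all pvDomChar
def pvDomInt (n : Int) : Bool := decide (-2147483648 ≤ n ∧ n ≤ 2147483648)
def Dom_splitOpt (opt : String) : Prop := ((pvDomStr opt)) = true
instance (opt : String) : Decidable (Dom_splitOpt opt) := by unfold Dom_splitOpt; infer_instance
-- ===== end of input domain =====

-- B replaces A's flag-driven two-accumulator loop by locate-then-partition
-- (find the first 'infer' line, join the two slices); same cost, simpler.

-- ===== PORT A =====
-- the for loop: state (lhs, rhs, appendingToLHS), one step per line
def splitOptLoop : List (List Char) → List Char → List Char → Bool → List Char × List Char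
  | [], lhs, rhs, _ => (lhs, rhs)
  | line :: rest, lhs, rhs, flag =>
    let lhs' := if flag then lhs ++ line ++ ['\n'] else lhs
    let rhs' := if flag then rhs else rhs ++ line ++ ['\n']
    let flag' := if PySem.Chars.startswith line "infer".toList then false else flag
    splitOptLoop rest lhs' rhs' flag'

def splitOpt (opt : String) : String × String :=
  let lines := PySem.Chars.splitOn opt.toList ['\n']
  let (lhs, rhs) := splitOptLoop lines [] [] true
  (String.ofList (PySem.Chars.strip lhs), String.ofList (PySem.Chars.strip rhs))

-- ===== PORT B =====
def splitOpt_alt (opt : String) : String × String :=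
  let lines := PySem.Chars.splitOn opt.toList ['\n']
  let i := (lines.findIdx? (fun line => PySem.Chars.startswith line "infer".toList)).getD lines.length
  (String.ofList (PySem.Chars.strip (PySem.Chars.join ['\n'] (lines.take (i + 1)))),
   String.ofList (PySem.Chars.strip (PySem.Chars.join ['\n'] (lines.drop (i + 1)))))

-- ===== PRECONDITION & SPEC =====
def Spec_splitOpt (opt : String) (out : String × String) : Prop := out = splitOpt_alt opt
instance (opt : String) (out : String × String) : Decidable (Spec_splitOpt opt out) := by unfold Spec_splitOpt; infer_instance

-- ===== CLAIM (what is proved, stated in full; the proofs are below) =====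
def Claim_equal_splitOpt : Prop := ∀ (opt : String), Dom_splitOpt opt → Spec_splitOpt opt (splitOpt opt)

-- ===== LEMMAS AND PROOFS =====

-- A's per-line suffixing, as a map
def pvNl (l : List Char) : List Char := l ++ ['\n']

lemma flatten_map_pvNl_eq_join {ls : List (List Char)} (h : ls ≠ []) :
    (ls.map pvNl).flatten = PySem.Chars.join ['\n'] ls ++ ['\n'] := by
  induction ls with
  | nil => exact absurd rfl h
  | cons a t ih =>
    cases t with
    | nil => simp [pvNl, PySem.Chars.join, List.intercalate]
    | cons b t' =>
      simp only [List.map_cons, List.flatten_cons] at *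
      rw [ih (by simp)]
      simp [pvNl, PySem.Chars.join, List.intercalate, List.intersperse]

lemma rstrip_append_nl (x : List Char) (c : Char) (hc : PySem.Chars.isspace c = true) :
    PySem.Chars.rstrip (x ++ [c]) = PySem.Chars.rstrip x := by
  simp [PySem.Chars.rstrip, hc]

lemma strip_append_nl (x : List Char) (c : Char) (hc : PySem.Chars.isspace c = true) :
    PySem.Chars.strip (x ++ [c]) = PySem.Chars.strip x := by
  unfold PySem.Chars.strip PySem.Chars.lstrip
  rw [List.dropWhile_append]
  by_cases h : (List.dropWhile PySem.Chars.isspace x).isEmpty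
  · simp [List.dropWhile, hc, PySem.Chars.rstrip, List.isEmpty_iff.mp h]
  · simp only [h, Bool.false_eq_true, if_false]
    exact rstrip_append_nl _ _ hc

-- once the flag is False everything goes to rhs
lemma splitOptLoop_false (ls : List (List Char)) (lhs rhs : List Char) :
    splitOptLoop ls lhs rhs false = (lhs, rhs ++ (ls.map pvNl).flatten) := by
  induction ls generalizing rhs with
  | nil => simp [splitOptLoop]
  | cons a t ih => simp [splitOptLoop, ih, pvNl]

-- characterisation of A's loop from a True flag, via the first-'infer' index
lemma splitOptLoop_true (ls : List (List Char)) (lhs rhs : List Char) :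
    splitOptLoop ls lhs rhs true =
      match ls.findIdx? (fun line => PySem.Chars.startswith line "infer".toList) with
      | none => (lhs ++ (ls.map pvNl).flatten, rhs)
      | some k => (lhs ++ ((ls.take (k + 1)).map pvNl).flatten,
                   rhs ++ ((ls.drop (k + 1)).map pvNl).flatten) := by
  induction ls generalizing lhs rhs with
  | nil => simp [splitOptLoop]
  | cons a t ih =>
    rw [List.findIdx?_cons]
    by_cases ha : PySem.Chars.startswith a "infer".toList
    · simp only [splitOptLoop, ha, if_true]
      rw [splitOptLoop_false]
      simp [pvNl]
    · simp only [splitOptLoop, ha, if_true, if_false, Bool.false_eq_true]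
      rw [ih]
      cases h : t.findIdx? (fun line => PySem.Chars.startswith line "infer".toList) with
      | none => simp [pvNl]
      | some k => simp [pvNl]

lemma strip_flatten_eq_strip_join (ls : List (List Char)) :
    PySem.Chars.strip ((ls.map pvNl).flatten) =
      PySem.Chars.strip (PySem.Chars.join ['\n'] ls) := by
  cases ls with
  | nil => rfl
  | cons a t =>
    rw [flatten_map_pvNl_eq_join (by simp), strip_append_nl]
    decide

-- ===== VERDICT (by name: the statement is the Claim_ definition above) =====
theorem splitOpt_spec : Claim_equal_splitOpt := by
  intro opt _
  unfold Spec_splitOpt splitOpt splitOpt_alt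
  dsimp only
  rw [splitOptLoop_true]
  cases h : (PySem.Chars.splitOn opt.toList ['\n']).findIdx?
      (fun line => PySem.Chars.startswith line "infer".toList) with
  | none =>
    simp only [Option.getD_none, List.nil_append]
    rw [List.take_of_length_le (by omega), List.drop_eq_nil_of_le (by omega)]
    simp [strip_flatten_eq_strip_join, PySem.Chars.join, List.intercalate]
  | some k =>
    simp only [Option.getD_some, List.nil_append]
    rw [strip_flatten_eq_strip_join, strip_flatten_eq_strip_join]
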